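-- pv_equiv track=rewrite | github.com/akashdeep3194/Scaler | d12/Pattern Printing -2.py | solve
-- ===== SOURCE A (Python) =====
-- def solve(A):
--
--     ans = []
--
--     for i in range(A):
--         li=[]
--         k=A
--         for j in range(A):
--             if j<A-1-i:
--                 li.append(0)
--             else:
--                 li.append(k)
--             k -= 1
--         ans.append(li)
--     return ans
-- ===== SOURCE B (Python) =====
-- def solve(A):
--     return [[0] * (A - 1 - i) + list(range(i + 1, 0, -1)) for i in range(A)]
-- ===== Notes on version B (the rewrite author's own statement) =====
-- stated objective: simpler
-- what changed: Each row is built in one shot as a zero block [0]*(A-1-i) concatenated with the descending range(i+1,0,-1), replacing A's inner per-column loop with its j<A-1-i branch and decrementing counter k.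
import Mathlib
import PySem

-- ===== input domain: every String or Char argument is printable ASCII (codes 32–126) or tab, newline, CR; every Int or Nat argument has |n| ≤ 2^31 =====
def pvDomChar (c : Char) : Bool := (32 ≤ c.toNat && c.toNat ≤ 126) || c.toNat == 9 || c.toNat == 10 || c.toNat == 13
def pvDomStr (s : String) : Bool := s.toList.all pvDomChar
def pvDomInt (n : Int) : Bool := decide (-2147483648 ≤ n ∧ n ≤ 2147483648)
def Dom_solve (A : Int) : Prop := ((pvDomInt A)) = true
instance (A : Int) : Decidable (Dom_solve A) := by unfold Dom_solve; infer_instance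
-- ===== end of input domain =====

-- B builds each row as a zero prefix plus a descending range, instead of A's
-- element-by-element inner loop with a branch and a decrementing counter (objective: simpler).

-- ===== PORT A =====
def solve (A : Int) : List (List Int) :=
  (PySem.List.pyRange 0 A 1).foldl (fun ans i =>
    let p := (PySem.List.pyRange 0 A 1).foldl
      (fun (s : List Int × Int) j =>
        ((if j < A - 1 - i then s.1 ++ [0] else s.1 ++ [s.2]), s.2 - 1))
      (([] : List Int), A)
    ans ++ [p.1]) []

-- ===== PORT B =====
def solve_alt (A : Int) : List (List Int) :=
  (PySem.List.pyRange 0 A 1).map (fun i =>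
    List.replicate (A - 1 - i).toNat 0 ++ PySem.List.pyRange (i + 1) 0 (-1))

-- ===== PRECONDITION & SPEC =====
def Spec_solve (A : Int) (out : List (List Int)) : Prop := out = solve_alt A
instance (A : Int) (out : List (List Int)) : Decidable (Spec_solve A out) := by unfold Spec_solve; infer_instance

-- ===== CLAIM (what is proved, stated in full; the proofs are below) =====
def Claim_equal_solve : Prop := ∀ (A : Int), Dom_solve A → Spec_solve A (solve A)

-- ===== LEMMAS AND PROOFS =====

theorem foldl_append_singleton {α β : Type} (f : α → β) :
    ∀ (l : List α) (init : List β),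
      l.foldl (fun acc x => acc ++ [f x]) init = init ++ l.map f := by
  intro l
  induction l with
  | nil => simp
  | cons x xs ih => intro init; simp [List.foldl_cons, ih]

/-- The inner loop of A, run over `List.range n` with threaded `(row, k)` state. -/
theorem inner_loop_char (t : Int) :
    ∀ (n : Nat) (li : List Int) (k : Int),
      (List.range n).foldl
        (fun (s : List Int × Int) (j : Nat) =>
          ((if (j : Int) < t then s.1 ++ [0] else s.1 ++ [s.2]), s.2 - 1)) (li, k)
      = (li ++ (List.range n).map (fun (j : Nat) => if (j : Int) < t then (0 : Int) else k - (j : Int)),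
         k - n) := by
  intro n
  induction n with
  | zero => intro li k; simp
  | succ m ih =>
    intro li k
    rw [List.range_succ, List.foldl_append, List.foldl_cons, List.foldl_nil, ih]
    by_cases h : (m : Int) < t <;>
      simp [h, Prod.ext_iff, List.append_assoc] <;> omega

/-- The per-row closed form: A's inner loop equals B's two-piece row. -/
theorem row_eq (A i : Int) (h0 : 0 ≤ i) (h1 : i < A) :
    (List.range A.toNat).map (fun (j : Nat) => if (j : Int) < A - 1 - i then (0 : Int) else A - (j : Int))
    = List.replicate (A - 1 - i).toNat 0 ++ PySem.List.pyRange (i + 1) 0 (-1) := by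
  rw [PySem.List.pyRange_neg_one]
  apply List.ext_getElem
  · simp; omega
  · intro j hj1 hj2
    simp only [List.getElem_map, List.getElem_range]
    by_cases h : (j : Int) < A - 1 - i
    · rw [if_pos h, List.getElem_append_left (by simp; omega)]
      simp
    · rw [if_neg h, List.getElem_append_right (by simp; omega)]
      simp only [List.getElem_map, List.getElem_range, List.length_replicate]
      simp at hj1
      omega

theorem solve_eq_alt (A : Int) : solve A = solve_alt A := by
  unfold solve solve_alt
  rw [foldl_append_singleton]
  simp only [List.nil_append]
  apply List.map_congr_left
  intro i hi
  rw [PySem.List.mem_pyRange_one] at hi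
  have hfold :
      (PySem.List.pyRange 0 A 1).foldl
        (fun (s : List Int × Int) j =>
          ((if j < A - 1 - i then s.1 ++ [0] else s.1 ++ [s.2]), s.2 - 1))
        (([] : List Int), A)
      = ((List.range A.toNat).map
          (fun (j : Nat) => if (j : Int) < A - 1 - i then (0 : Int) else A - (j : Int)), A - A.toNat) := by
    rw [PySem.List.pyRange_one, List.foldl_map]
    simpa using inner_loop_char (A - 1 - i) A.toNat [] A
  rw [hfold]
  exact row_eq A i hi.1 hi.2

-- ===== VERDICT (by name: the statement is the Claim_ definition above) =====
theorem solve_spec : Claim_equal_solve := by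
  intro A _
  unfold Spec_solve
  exact solve_eq_alt A
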